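-- pv_equiv track=rewrite | github.com/libhet/tgbot | app/scheduler.py | validate_intervals
-- ===== SOURCE A (Python) =====
-- from typing import Iterable, List, Sequence
--
-- def validate_intervals(intervals: Sequence[int]) -> List[int]:
--     """Ensure intervals are positive integers."""
--
--     if not intervals:
--         raise ValueError("Intervals list cannot be empty")
--     normalized = []
--     for interval in intervals:
--         if interval <= 0:
--             raise ValueError("Intervals must be positive integers")
--         normalized.append(int(interval))
--     return normalized
-- ===== SOURCE B (Python) =====
-- def validate_intervals(intervals):
--     """Ensure intervals are positive integers."""
--     if not intervals:
--         raise ValueError("Intervals list cannot be empty")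
--     if min(intervals) <= 0:
--         raise ValueError("Intervals must be positive integers")
--     return [int(interval) for interval in intervals]
-- ===== Notes on version B (the rewrite author's own statement) =====
-- stated objective: idiomatic
-- what changed: Replaces A's single fused validate-and-append loop with two separate passes: an aggregate min() reduction for validation followed by a list-comprehension map for normalization.
import Mathlib
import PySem

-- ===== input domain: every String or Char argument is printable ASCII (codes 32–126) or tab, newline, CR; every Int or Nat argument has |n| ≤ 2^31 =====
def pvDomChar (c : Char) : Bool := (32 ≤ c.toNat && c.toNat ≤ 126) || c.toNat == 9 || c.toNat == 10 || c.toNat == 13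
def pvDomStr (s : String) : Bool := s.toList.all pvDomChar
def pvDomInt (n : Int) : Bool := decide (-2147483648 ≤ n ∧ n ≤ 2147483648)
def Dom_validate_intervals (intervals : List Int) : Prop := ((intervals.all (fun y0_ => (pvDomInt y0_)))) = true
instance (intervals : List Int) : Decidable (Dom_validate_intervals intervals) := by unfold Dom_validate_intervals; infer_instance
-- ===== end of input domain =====

-- B validates with an aggregate min() pass then normalizes with a map, instead of A's fused loop (idiomatic).

-- ===== PORT A =====
-- A's loop: append int(interval) for each, raising on a non-positive element (raise = none, excluded by Pre_).
def validate_intervals_loop (xs : List Int) (normalized : List Int) : Option (List Int) :=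
  match xs with
  | [] => some normalized
  | x :: rest => if x ≤ 0 then none else validate_intervals_loop rest (normalized ++ [x])

def validate_intervals (intervals : List Int) : List Int :=
  (validate_intervals_loop intervals []).getD []

-- ===== PORT B =====
-- min(intervals) via PySem.List.min?, then the comprehension map (int(x) = x on Int inputs).
def validate_intervals_alt (intervals : List Int) : List Int :=
  match PySem.List.min? intervals (fun x => x) with
  | none => []
  | some m => if m ≤ 0 then [] else intervals.map (fun interval => interval)

-- ===== PRECONDITION & SPEC =====
-- Pre_ excludes exactly the inputs where A raises ValueError: the empty list and lists with a non-positive element.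
def Pre_validate_intervals (intervals : List Int) : Prop :=
  intervals ≠ [] ∧ ∀ x ∈ intervals, 0 < x
instance (intervals : List Int) : Decidable (Pre_validate_intervals intervals) := by unfold Pre_validate_intervals; infer_instance

def pvWitness_validate_intervals : List Int := [3, 1, 2]

def Spec_validate_intervals (intervals : List Int) (out : List Int) : Prop := out = validate_intervals_alt intervals
instance (intervals : List Int) (out : List Int) : Decidable (Spec_validate_intervals intervals out) := by unfold Spec_validate_intervals; infer_instance

-- ===== CLAIM (what is proved, stated in full; the proofs are below) =====
def Claim_equal_validate_intervals : Prop := ∀ (intervals : List Int), Dom_validate_intervals intervals → Pre_validate_intervals intervals → Spec_validate_intervals intervals (validate_intervals intervals)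

-- ===== LEMMAS AND PROOFS =====

-- A's loop, when every element is positive, appends all of them.
theorem validate_intervals_loop_pos (xs acc : List Int) (h : ∀ x ∈ xs, 0 < x) :
    validate_intervals_loop xs acc = some (acc ++ xs) := by
  induction xs generalizing acc with
  | nil => simp [validate_intervals_loop]
  | cons x rest ih =>
    have hx : 0 < x := h x (by simp)
    simp [validate_intervals_loop, not_le.mpr hx, ih _ (fun y hy => h y (by simp [hy]))]

theorem min?_pos (xs : List Int) (hne : xs ≠ []) (h : ∀ x ∈ xs, 0 < x) :
    ∃ m, PySem.List.min? xs (fun x => x) = some m ∧ 0 < m := by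
  rcases hm : PySem.List.min? xs (fun x => x) with _ | m
  · exact absurd (((PySem.List.min?_eq_none_iff xs (fun x => x)).mp hm)) hne
  · exact ⟨m, rfl, h m (PySem.List.min?_mem hm)⟩

-- ===== VERDICT (by name: the statement is the Claim_ definition above) =====
theorem validate_intervals_spec : Claim_equal_validate_intervals := by
  intro intervals _ ⟨hne, hpos⟩
  obtain ⟨m, hm, hmpos⟩ := min?_pos intervals hne hpos
  simp [Spec_validate_intervals, validate_intervals, validate_intervals_alt, hm,
    not_le.mpr hmpos, validate_intervals_loop_pos intervals [] hpos]
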